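-- pv_equiv track=rewrite | github.com/Stuksus/Matrix | main.py | find_max_count_zero
-- ===== SOURCE A (Python) =====
-- def find_max_count_zero(matrix):  # return [...]: [0]-count zero, [1]-index columns or rows, [2]='1' rows or '0' columns
--     maximum_zero_rows = [-(2 ** 32), 0, 1]
--     maximum_zero_colms = [-(2 ** 32), 0, 0]
--
--     for i in range(len(matrix)):
--         count_zero_rows = 0
--         count_zero_colms = 0
--         for j in matrix[i]:
--             if j == 0:
--                 count_zero_rows += 1
--             if count_zero_rows > maximum_zero_rows[0]:
--                 maximum_zero_rows[0] = count_zero_rows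
--                 maximum_zero_rows[1] = i
--
--         for h in range(len(matrix)):
--
--             if matrix[h][i] == 0:
--                 count_zero_colms += 1
--             if count_zero_colms > maximum_zero_colms[0]:
--                 maximum_zero_colms[0] = count_zero_colms
--                 maximum_zero_colms[1] = i
--
--     if maximum_zero_rows[0] > maximum_zero_colms[0]:
--         return maximum_zero_rows
--     elif maximum_zero_colms[0] > maximum_zero_rows[0]:
--         return maximum_zero_colms
--     elif maximum_zero_colms[0] == maximum_zero_rows[0] and maximum_zero_colms[0] != 0:
--         return maximum_zero_rows
--     else:
--         return [0, 0, 0]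
-- ===== SOURCE B (Python) =====
-- def find_max_count_zero(matrix):  # return [...]: [0]-count zero, [1]-index columns or rows, [2]='1' rows or '0' columns
--     n = len(matrix)
--     cands = [(row.count(0), 1, -i) for i, row in enumerate(matrix)]
--     cands += [([row[i] for row in matrix].count(0), 0, -i) for i in range(n)]
--     if not cands:
--         return [0, 0, 0]
--     count, kind, neg_idx = max(cands)
--     if count == 0:
--         return [0, 0, 0]
--     return [count, -neg_idx, kind]
-- ===== Notes on version B (the rewrite author's own statement) =====
-- stated objective: simpler
-- what changed: B builds one flat candidate list of (zero-count, kind, -index) tuples for all rows and all columns and selects the answer with a single lexicographic max() — the tuple order encodes A's entire tie-breaking (rows beat columns, earliest index wins) — instead of A's interleaved per-element running-max updates inside nested loops; on the empty matrix B returns [0,0,0] instead of A's leaked -2**32 sentinel.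
-- intended difference: On the empty matrix A returns its leaked sentinel [-4294967296, 0, 1] while B returns [0, 0, 0], the intended 'no zeros found' answer. — e.g. on find_max_count_zero([]): A returns [-4294967296, 0, 1], B returns [0, 0, 0]
import Mathlib
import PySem

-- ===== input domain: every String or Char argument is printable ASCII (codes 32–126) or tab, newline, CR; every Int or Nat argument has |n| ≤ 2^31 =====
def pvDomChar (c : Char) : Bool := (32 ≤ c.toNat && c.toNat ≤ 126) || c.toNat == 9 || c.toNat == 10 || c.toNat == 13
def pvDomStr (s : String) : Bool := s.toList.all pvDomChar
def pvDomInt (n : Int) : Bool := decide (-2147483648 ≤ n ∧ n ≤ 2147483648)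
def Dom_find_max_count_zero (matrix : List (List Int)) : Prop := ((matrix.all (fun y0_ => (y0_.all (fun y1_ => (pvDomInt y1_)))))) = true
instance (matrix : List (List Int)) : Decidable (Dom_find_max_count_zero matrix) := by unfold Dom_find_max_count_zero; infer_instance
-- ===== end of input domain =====

-- B builds one flat candidate list of (zero-count, kind, -index) tuples for rows and columns and
-- picks the answer with a single lexicographic max (simpler decomposition, same cost); on the
-- empty matrix it returns [0,0,0] where A leaks its sentinel (stated as D_ below).

-- ===== PORT A =====
-- shared body of A's two identical inner update steps: bump the running zero count and
-- update the (best, index) pair on a strict increase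
def aStep (i : Int) (acc : Int × (Int × Int)) (v : Int) : Int × (Int × Int) :=
  let cnt := if v = 0 then acc.1 + 1 else acc.1
  (cnt, if cnt > acc.2.1 then (cnt, i) else acc.2)

def find_max_count_zero (matrix : List (List Int)) : List Int :=
  let n : Int := PySem.List.len matrix
  let st :=
    (PySem.List.pyRange 0 n 1).foldl
      (fun (st : (Int × Int) × (Int × Int)) i =>
        (((PySem.List.pyGetD matrix i []).foldl (aStep i) (0, st.1)).2,
         ((PySem.List.pyRange 0 n 1).foldl
            (fun acc h => aStep i acc (PySem.List.pyGetD (PySem.List.pyGetD matrix h []) i 0))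
            (0, st.2)).2))
      ((-(2 ^ 32), 0), (-(2 ^ 32), 0))
  if st.1.1 > st.2.1 then [st.1.1, st.1.2, 1]
  else if st.2.1 > st.1.1 then [st.2.1, st.2.2, 0]
  else if st.2.1 = st.1.1 ∧ st.2.1 ≠ 0 then [st.1.1, st.1.2, 1]
  else [0, 0, 0]

-- ===== PORT B =====
-- Python's '>' on int 3-tuples: lexicographic (hand-ported, exact for Int × Int × Int)
def lt3 (a b : Int × Int × Int) : Bool :=
  a.1 < b.1 || (a.1 == b.1 && (a.2.1 < b.2.1 || (a.2.1 == b.2.1 && a.2.2 < b.2.2)))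

-- Python's max() on a list of int 3-tuples: first maximal element under the lexicographic
-- order (hand-ported, exact: 'max' replaces the running best only on a strict increase)
def pyMax3 (l : List (Int × Int × Int)) : Option (Int × Int × Int) :=
  match l with
  | [] => none
  | x :: xs => some (xs.foldl (fun cur v => if lt3 cur v then v else cur) x)

def find_max_count_zero_alt (matrix : List (List Int)) : List Int :=
  let n : Int := PySem.List.len matrix
  let cands : List (Int × Int × Int) :=
    (PySem.List.enumerate matrix).map
      (fun p => ((PySem.List.count p.2 0 : Int), (1 : Int), -p.1))
    ++ (PySem.List.pyRange 0 n 1).map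
      (fun i => ((PySem.List.count (matrix.map (fun row => PySem.List.pyGetD row i 0)) 0 : Int),
                 (0 : Int), -i))
  match pyMax3 cands with
  | none => [0, 0, 0]
  | some (count, kind, negIdx) =>
      if count = 0 then [0, 0, 0] else [count, -negIdx, kind]

-- ===== PRECONDITION & SPEC =====
-- Pre_ excludes ragged matrices with a row shorter than the number of rows: there A's
-- column access matrix[h][i] raises IndexError (and B's row[i] does too).
def Pre_find_max_count_zero (matrix : List (List Int)) : Prop :=
  ∀ row ∈ matrix, matrix.length ≤ row.length
instance (matrix : List (List Int)) : Decidable (Pre_find_max_count_zero matrix) := by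
  unfold Pre_find_max_count_zero; infer_instance
def pvWitness_find_max_count_zero : List (List Int) := [[0, 1], [1, 0]]

-- On the empty matrix A returns its leaked sentinel [-4294967296, 0, 1]; B returns [0, 0, 0],
-- the intended 'no zeros found' answer.
def D_find_max_count_zero (matrix : List (List Int)) : Prop := matrix = []
instance (matrix : List (List Int)) : Decidable (D_find_max_count_zero matrix) := by
  unfold D_find_max_count_zero; infer_instance

def Spec_find_max_count_zero (matrix : List (List Int)) (out : List Int) : Prop :=
  ¬ D_find_max_count_zero matrix → out = find_max_count_zero_alt matrix
instance (matrix : List (List Int)) (out : List Int) : Decidable (Spec_find_max_count_zero matrix out) := by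
  unfold Spec_find_max_count_zero; infer_instance

def pvDiffWitness_find_max_count_zero : List (List Int) := []
def pvDiffWitnessOut_find_max_count_zero : (List Int) × (List Int) :=
  ([-4294967296, 0, 1], [0, 0, 0])

-- ===== CLAIM (what is proved, stated in full; the proofs are below) =====
def Claim_unchanged_find_max_count_zero : Prop := ∀ (matrix : List (List Int)), Dom_find_max_count_zero matrix → Pre_find_max_count_zero matrix → Spec_find_max_count_zero matrix (find_max_count_zero matrix)
def Claim_changed_find_max_count_zero : Prop := Dom_find_max_count_zero (pvDiffWitness_find_max_count_zero) ∧ Pre_find_max_count_zero (pvDiffWitness_find_max_count_zero) ∧ D_find_max_count_zero (pvDiffWitness_find_max_count_zero) ∧ find_max_count_zero (pvDiffWitness_find_max_count_zero) = pvDiffWitnessOut_find_max_count_zero.1 ∧ find_max_count_zero_alt (pvDiffWitness_find_max_count_zero) = pvDiffWitnessOut_find_max_count_zero.2 ∧ pvDiffWitnessOut_find_max_count_zero.1 ≠ pvDiffWitnessOut_find_max_count_zero.2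
def Claim_exact_find_max_count_zero : Prop := ∀ (matrix : List (List Int)), Dom_find_max_count_zero matrix → Pre_find_max_count_zero matrix → D_find_max_count_zero matrix → find_max_count_zero matrix ≠ find_max_count_zero_alt matrix

-- ===== LEMMAS AND PROOFS =====

-- the (best, index) update on a strict increase
def upd (st : Int × Int) (i c : Int) : Int × Int := if c > st.1 then (c, i) else st

-- zero count of a list, as A's inner loops accumulate it
def zc (l : List Int) : Int := (PySem.List.count l 0 : Int)

lemma zc_nonneg (l : List Int) : 0 ≤ zc l := by
  unfold zc; positivity

lemma upd_upd (st : Int × Int) (i c' c : Int) (h : c' ≤ c) :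
    upd (upd st i c') i c = upd st i c := by
  unfold upd; split_ifs <;> simp_all <;> omega

lemma aStep_eval (i c0 v : Int) (st : Int × Int) :
    aStep i (c0, st) v
      = ((if v = 0 then c0 + 1 else c0), upd st i (if v = 0 then c0 + 1 else c0)) := rfl

lemma aStep_fold (i : Int) (vals : List Int) : ∀ (c0 : Int) (st : Int × Int),
    vals.foldl (aStep i) (c0, st)
      = (c0 + zc vals, if vals = [] then st else upd st i (c0 + zc vals)) := by
  induction vals with
  | nil => intro c0 st; simp [zc, PySem.List.count_eq]
  | cons v vs ih =>
    intro c0 st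
    have hz : zc (v :: vs) = (if v = 0 then 1 else 0) + zc vs := by
      simp only [zc, PySem.List.count_eq, List.count_cons]
      split_ifs <;> simp_all <;> omega
    rw [List.foldl_cons, aStep_eval, ih]
    have hsum : (if v = 0 then c0 + 1 else c0) + zc vs = c0 + zc (v :: vs) := by
      rw [hz]; split_ifs <;> omega
    simp only [if_neg (List.cons_ne_nil v vs)]
    rw [← hsum]
    rcases eq_or_ne vs [] with h | h
    · subst h
      have h0 : zc ([] : List Int) = 0 := by simp [zc, PySem.List.count_eq]
      rw [h0, add_zero, if_pos rfl]
    · rw [if_neg h, upd_upd st i _ _ (by have := zc_nonneg vs; omega)]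

-- running best never decreases along an upd-fold
lemma upd_fold_ge (f : Int → Int) : ∀ (l : List Int) (s : Int × Int),
    s.1 ≤ (l.foldl (fun s i => upd s i (f i)) s).1 := by
  intro l
  induction l with
  | nil => intro s; simp
  | cons i l ih =>
    intro s
    have h1 : s.1 ≤ (upd s i (f i)).1 := by unfold upd; split_ifs <;> simp <;> omega
    calc s.1 ≤ (upd s i (f i)).1 := h1
      _ ≤ _ := ih _

-- starting an upd-fold at a larger best: the result is the (-1)-style fold if it beats the
-- start, else the start itself
lemma upd_fold_start (f : Int → Int) : ∀ (l : List Int) (a b : Int × Int), a.1 ≤ b.1 →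
    l.foldl (fun s i => upd s i (f i)) b
      = if (l.foldl (fun s i => upd s i (f i)) a).1 > b.1
        then l.foldl (fun s i => upd s i (f i)) a else b := by
  intro l
  induction l with
  | nil => intro a b hab; simp; omega
  | cons i l ih =>
    intro a b hab
    simp only [List.foldl_cons]
    by_cases hb : f i > b.1
    · have ha : f i > a.1 := by omega
      rw [show upd b i (f i) = (f i, i) by unfold upd; rw [if_pos hb],
          show upd a i (f i) = (f i, i) by unfold upd; rw [if_pos ha],
          if_pos (by have := upd_fold_ge f l (f i, i); simp at this ⊢; omega)]
    · rw [show upd b i (f i) = b by unfold upd; rw [if_neg hb]]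
      by_cases ha : f i > a.1
      · rw [show upd a i (f i) = (f i, i) by unfold upd; rw [if_pos ha]]
        exact ih (f i, i) b (by simp; omega)
      · rw [show upd a i (f i) = a by unfold upd; rw [if_neg ha]]
        exact ih a b hab

-- the lexicographic-max fold over same-kind candidates with strictly increasing indices
-- is exactly the strict-argmax upd-fold
lemma lexfold_same (f : Int → Int) (k : Int) : ∀ (l : List Int) (b j : Int),
    (∀ i ∈ l, j < i) → l.Pairwise (· < ·) →
    l.foldl (fun cur i => if lt3 cur (f i, k, -i) then (f i, k, -i) else cur) (b, k, -j)
      = ((l.foldl (fun s i => upd s i (f i)) (b, j)).1, k,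
         -(l.foldl (fun s i => upd s i (f i)) (b, j)).2) := by
  intro l
  induction l with
  | nil => intro b j _ _; simp
  | cons i l ih =>
    intro b j hgt hp
    have hji : j < i := hgt i (List.mem_cons_self)
    have hlt : lt3 (b, k, -j) (f i, k, -i) = decide (b < f i) := by
      simp only [lt3]
      by_cases h : b < f i
      · simp [h]
      · simp [h]
        omega
    simp only [List.foldl_cons, hlt]
    by_cases h : b < f i
    · rw [if_pos (by simp [h]), show upd (b, j) i (f i) = (f i, i) by unfold upd; simp; omega]
      exact ih (f i) i (fun x hx => (List.pairwise_cons.mp hp).1 x hx) (List.pairwise_cons.mp hp).2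
    · rw [if_neg (by simp [h]), show upd (b, j) i (f i) = (b, j) by unfold upd; simp; omega]
      exact ih b j (fun x hx => hgt x (List.mem_cons_of_mem i hx)) (List.pairwise_cons.mp hp).2

-- the lexicographic-max fold continuing over kind-0 candidates from a kind-1 state:
-- switches iff some column count strictly beats the running best
lemma lexfold_cross (f : Int → Int) : ∀ (l : List Int) (b t : Int),
    l.Pairwise (· < ·) →
    l.foldl (fun cur i => if lt3 cur (f i, 0, -i) then (f i, 0, -i) else cur) (b, 1, t)
      = if (l.foldl (fun s i => upd s i (f i)) (b, 0)).1 > b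
        then ((l.foldl (fun s i => upd s i (f i)) (b, 0)).1, 0,
              -(l.foldl (fun s i => upd s i (f i)) (b, 0)).2)
        else (b, 1, t) := by
  intro l
  induction l with
  | nil => intro b t _; simp
  | cons i l ih =>
    intro b t hp
    have hlt : lt3 (b, 1, t) (f i, 0, -i) = decide (b < f i) := by
      simp only [lt3]
      by_cases h : b < f i
      · simp [h]
      · simp [h]
    simp only [List.foldl_cons, hlt]
    by_cases h : b < f i
    · rw [if_pos (by simp [h]), show upd (b, 0) i (f i) = (f i, i) by unfold upd; simp; omega,
        lexfold_same f 0 l (f i) i (fun x hx => (List.pairwise_cons.mp hp).1 x hx)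
          (List.pairwise_cons.mp hp).2,
        if_pos (by have := upd_fold_ge f l (f i, i); simp at this; omega)]
    · rw [if_neg (by simp [h]), show upd (b, 0) i (f i) = (b, 0) by unfold upd; simp; omega]
      exact ih b t (List.pairwise_cons.mp hp).2

-- B's per-column candidate count equals the zero count of the extracted column (definitional)
-- (zc is (PySem.List.count · 0 : Int), matching the port's casts)

-- abbreviations for the per-index row / column zero counts of a fixed matrix
def rcnt (m : List (List Int)) (i : Int) : Int := zc (PySem.List.pyGetD m i [])
def ccnt (m : List (List Int)) (i : Int) : Int := zc (m.map (fun row => PySem.List.pyGetD row i 0))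

-- B's value, re-expressed through the two strict-argmax upd-folds
lemma alt_eval (m : List (List Int)) (hne : m ≠ []) :
    find_max_count_zero_alt m
      = (if ((PySem.List.pyRange 0 (PySem.List.len m) 1).foldl
              (fun s i => upd s i (ccnt m i))
              (((PySem.List.pyRange 1 (PySem.List.len m) 1).foldl
                  (fun s i => upd s i (rcnt m i)) (rcnt m 0, 0)).1, 0)).1
           > ((PySem.List.pyRange 1 (PySem.List.len m) 1).foldl
                (fun s i => upd s i (rcnt m i)) (rcnt m 0, 0)).1
         then (if ((PySem.List.pyRange 0 (PySem.List.len m) 1).foldl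
                    (fun s i => upd s i (ccnt m i))
                    (((PySem.List.pyRange 1 (PySem.List.len m) 1).foldl
                        (fun s i => upd s i (rcnt m i)) (rcnt m 0, 0)).1, 0)).1 = 0
               then [0, 0, 0]
               else [((PySem.List.pyRange 0 (PySem.List.len m) 1).foldl
                        (fun s i => upd s i (ccnt m i))
                        (((PySem.List.pyRange 1 (PySem.List.len m) 1).foldl
                            (fun s i => upd s i (rcnt m i)) (rcnt m 0, 0)).1, 0)).1,
                     ((PySem.List.pyRange 0 (PySem.List.len m) 1).foldl
                        (fun s i => upd s i (ccnt m i))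
                        (((PySem.List.pyRange 1 (PySem.List.len m) 1).foldl
                            (fun s i => upd s i (rcnt m i)) (rcnt m 0, 0)).1, 0)).2, 0])
         else (if ((PySem.List.pyRange 1 (PySem.List.len m) 1).foldl
                    (fun s i => upd s i (rcnt m i)) (rcnt m 0, 0)).1 = 0
               then [0, 0, 0]
               else [((PySem.List.pyRange 1 (PySem.List.len m) 1).foldl
                        (fun s i => upd s i (rcnt m i)) (rcnt m 0, 0)).1,
                     ((PySem.List.pyRange 1 (PySem.List.len m) 1).foldl
                        (fun s i => upd s i (rcnt m i)) (rcnt m 0, 0)).2, 1])) := by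
  have hlen : 0 < m.length := List.length_pos_iff.mpr hne
  have hN : (0 : Int) < PySem.List.len m := by
    simp only [PySem.List.len_eq]; exact_mod_cast hlen
  have hsplit : PySem.List.pyRange 0 (PySem.List.len m) 1
      = 0 :: PySem.List.pyRange 1 (PySem.List.len m) 1 := PySem.List.pyRange_one_cons hN
  simp only [find_max_count_zero_alt]
  rw [PySem.List.enumerate_eq_map_pyRange m ([] : List Int), List.map_map]
  rw [show ((fun (p : Int × List Int) => (((PySem.List.count p.2 0 : Nat) : Int), (1 : Int), -p.1))
        ∘ fun j => (j, PySem.List.pyGetD m j [])) = fun j => (rcnt m j, (1 : Int), -j) from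
      funext fun j => by simp [rcnt, zc]]
  rw [show (fun i => (((PySem.List.count (List.map (fun row => PySem.List.pyGetD row i 0) m) 0 : Nat) : Int),
        (0 : Int), -i)) = fun i => (ccnt m i, (0 : Int), -i) from
      funext fun i => by simp [ccnt, zc]]
  rw [show (PySem.List.pyRange 0 (PySem.List.len m) 1).map (fun j => (rcnt m j, (1 : Int), -j))
        = (rcnt m 0, (1 : Int), -(0 : Int)) :: (PySem.List.pyRange 1 (PySem.List.len m) 1).map
            (fun j => (rcnt m j, (1 : Int), -j)) from by rw [hsplit]; rfl]
  rw [List.cons_append]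
  simp only [pyMax3]
  rw [List.foldl_append, List.foldl_map, List.foldl_map]
  rw [lexfold_same (rcnt m) 1 (PySem.List.pyRange 1 (PySem.List.len m) 1) (rcnt m 0) 0
        (fun i hi => by have := (PySem.List.mem_pyRange_one.mp hi).1; omega)
        (PySem.List.pairwise_lt_pyRange_one 1 (PySem.List.len m))]
  rw [lexfold_cross (ccnt m) (PySem.List.pyRange 0 (PySem.List.len m) 1) _ _
        (PySem.List.pairwise_lt_pyRange_one 0 (PySem.List.len m))]
  by_cases h : (List.foldl (fun s i => upd s i (ccnt m i))
      ((List.foldl (fun s i => upd s i (rcnt m i)) (rcnt m 0, 0)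
          (PySem.List.pyRange 1 (PySem.List.len m) 1)).1, 0)
      (PySem.List.pyRange 0 (PySem.List.len m) 1)).1
      > (List.foldl (fun s i => upd s i (rcnt m i)) (rcnt m 0, 0)
          (PySem.List.pyRange 1 (PySem.List.len m) 1)).1
  · simp only [if_pos h, neg_neg]
  · simp only [if_neg h, neg_neg]

-- A's value, re-expressed through the same folds (needs Pre_: every row reaches length n)
lemma a_eval (m : List (List Int)) (hne : m ≠ [])
    (hPre : ∀ row ∈ m, m.length ≤ row.length) :
    find_max_count_zero m
      = (if ((PySem.List.pyRange 1 (PySem.List.len m) 1).foldl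
              (fun s i => upd s i (rcnt m i)) (rcnt m 0, 0)).1
           > ((PySem.List.pyRange 1 (PySem.List.len m) 1).foldl
                (fun s i => upd s i (ccnt m i)) (ccnt m 0, 0)).1
         then [((PySem.List.pyRange 1 (PySem.List.len m) 1).foldl
                  (fun s i => upd s i (rcnt m i)) (rcnt m 0, 0)).1,
               ((PySem.List.pyRange 1 (PySem.List.len m) 1).foldl
                  (fun s i => upd s i (rcnt m i)) (rcnt m 0, 0)).2, 1]
         else if ((PySem.List.pyRange 1 (PySem.List.len m) 1).foldl
              (fun s i => upd s i (ccnt m i)) (ccnt m 0, 0)).1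
           > ((PySem.List.pyRange 1 (PySem.List.len m) 1).foldl
                (fun s i => upd s i (rcnt m i)) (rcnt m 0, 0)).1
         then [((PySem.List.pyRange 1 (PySem.List.len m) 1).foldl
                  (fun s i => upd s i (ccnt m i)) (ccnt m 0, 0)).1,
               ((PySem.List.pyRange 1 (PySem.List.len m) 1).foldl
                  (fun s i => upd s i (ccnt m i)) (ccnt m 0, 0)).2, 0]
         else if ((PySem.List.pyRange 1 (PySem.List.len m) 1).foldl
              (fun s i => upd s i (ccnt m i)) (ccnt m 0, 0)).1
           = ((PySem.List.pyRange 1 (PySem.List.len m) 1).foldl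
                (fun s i => upd s i (rcnt m i)) (rcnt m 0, 0)).1
            ∧ ((PySem.List.pyRange 1 (PySem.List.len m) 1).foldl
              (fun s i => upd s i (ccnt m i)) (ccnt m 0, 0)).1 ≠ 0
         then [((PySem.List.pyRange 1 (PySem.List.len m) 1).foldl
                  (fun s i => upd s i (rcnt m i)) (rcnt m 0, 0)).1,
               ((PySem.List.pyRange 1 (PySem.List.len m) 1).foldl
                  (fun s i => upd s i (rcnt m i)) (rcnt m 0, 0)).2, 1]
         else [0, 0, 0]) := by
  have hlen : 0 < m.length := List.length_pos_iff.mpr hne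
  have hN : (0 : Int) < PySem.List.len m := by
    simp only [PySem.List.len_eq]; exact_mod_cast hlen
  -- A's outer fold is a pair of independent strict-argmax folds
  have houtA :
      (PySem.List.pyRange 0 (PySem.List.len m) 1).foldl
        (fun (st : (Int × Int) × (Int × Int)) i =>
          (((PySem.List.pyGetD m i []).foldl (aStep i) (0, st.1)).2,
           ((PySem.List.pyRange 0 (PySem.List.len m) 1).foldl
              (fun acc h => aStep i acc (PySem.List.pyGetD (PySem.List.pyGetD m h []) i 0))
              (0, st.2)).2))
        ((-(2 ^ 32), 0), (-(2 ^ 32), 0))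
      = ((PySem.List.pyRange 0 (PySem.List.len m) 1).foldl
           (fun s i => upd s i (rcnt m i)) (-(2 ^ 32), 0),
         (PySem.List.pyRange 0 (PySem.List.len m) 1).foldl
           (fun s i => upd s i (ccnt m i)) (-(2 ^ 32), 0)) := by
    rw [PySem.List.foldl_congr_mem' _ _
        (fun (st : (Int × Int) × (Int × Int)) i => (upd st.1 i (rcnt m i), upd st.2 i (ccnt m i))) _ ?_]
    · exact PySem.List.foldl_prod_mk (fun s e => upd s e (rcnt m e)) (fun s e => upd s e (ccnt m e)) _ _ _
    · intro i hi st
      have hib := (PySem.List.mem_pyRange_one).mp hi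
      simp only [PySem.List.len_eq] at hib
      have hrowne : PySem.List.pyGetD m i [] ≠ [] := by
        rw [PySem.List.pyGetD_eq_getElem m [] hib.1 hib.2]
        have := hPre _ (List.getElem_mem (show i.toNat < m.length by omega))
        exact List.ne_nil_of_length_pos (by omega)
      have hcolne : m.map (fun row => PySem.List.pyGetD row i 0) ≠ [] := by
        simpa using hne
      rw [PySem.List.foldl_pyRange_zero_pyGetD m []
            (fun acc row => aStep i acc (PySem.List.pyGetD row i 0)) (0, st.2),
          ← List.foldl_map (f := fun row => PySem.List.pyGetD row i 0) (g := aStep i),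
          aStep_fold, aStep_fold, if_neg hrowne, if_neg hcolne]
      simp only [zero_add]
      rfl
  have hsplit : PySem.List.pyRange 0 (PySem.List.len m) 1
      = 0 :: PySem.List.pyRange 1 (PySem.List.len m) 1 := PySem.List.pyRange_one_cons hN
  have hPA : (PySem.List.pyRange 0 (PySem.List.len m) 1).foldl
      (fun s i => upd s i (rcnt m i)) (-(2 ^ 32), 0)
      = (PySem.List.pyRange 1 (PySem.List.len m) 1).foldl
          (fun s i => upd s i (rcnt m i)) (rcnt m 0, 0) := by
    rw [hsplit, List.foldl_cons,
      show upd (-(2 ^ 32), 0) 0 (rcnt m 0) = (rcnt m 0, 0) from by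
        unfold upd
        rw [if_pos (show rcnt m 0 > ((-(2 ^ 32) : Int), (0 : Int)).1 from by
          have := zc_nonneg (PySem.List.pyGetD m 0 []); simp [rcnt]; omega)]]
  have hQA : (PySem.List.pyRange 0 (PySem.List.len m) 1).foldl
      (fun s i => upd s i (ccnt m i)) (-(2 ^ 32), 0)
      = (PySem.List.pyRange 1 (PySem.List.len m) 1).foldl
          (fun s i => upd s i (ccnt m i)) (ccnt m 0, 0) := by
    rw [hsplit, List.foldl_cons,
      show upd (-(2 ^ 32), 0) 0 (ccnt m 0) = (ccnt m 0, 0) from by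
        unfold upd
        rw [if_pos (show ccnt m 0 > ((-(2 ^ 32) : Int), (0 : Int)).1 from by
          have := zc_nonneg (m.map (fun row => PySem.List.pyGetD row 0 0)); simp [ccnt]; omega)]]
  simp only [find_max_count_zero]
  rw [houtA, hPA, hQA]

-- ===== VERDICT (by name: the statement is the Claim_ definition above) =====
theorem find_max_count_zero_spec : Claim_unchanged_find_max_count_zero := by
  intro m _ hPre hD
  have hne : m ≠ [] := hD
  have hlen : 0 < m.length := List.length_pos_iff.mpr hne
  have hN : (0 : Int) < PySem.List.len m := by
    simp only [PySem.List.len_eq]; exact_mod_cast hlen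
  rw [a_eval m hne hPre, alt_eval m hne]
  set P := (PySem.List.pyRange 1 (PySem.List.len m) 1).foldl
      (fun s i => upd s i (rcnt m i)) (rcnt m 0, 0) with hP
  set Q := (PySem.List.pyRange 1 (PySem.List.len m) 1).foldl
      (fun s i => upd s i (ccnt m i)) (ccnt m 0, 0) with hQ
  have hP0 : rcnt m 0 ≤ P.1 := upd_fold_ge (rcnt m) _ (rcnt m 0, 0)
  have hQ0 : ccnt m 0 ≤ Q.1 := upd_fold_ge (ccnt m) _ (ccnt m 0, 0)
  have hrc0 : 0 ≤ rcnt m 0 := zc_nonneg _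
  have hcc0 : 0 ≤ ccnt m 0 := zc_nonneg _
  have hsplit : PySem.List.pyRange 0 (PySem.List.len m) 1
      = 0 :: PySem.List.pyRange 1 (PySem.List.len m) 1 := PySem.List.pyRange_one_cons hN
  have hQA : (PySem.List.pyRange 0 (PySem.List.len m) 1).foldl
      (fun s i => upd s i (ccnt m i)) (-1, 0) = Q := by
    rw [hsplit]
    simp only [List.foldl_cons]
    rw [hQ, show upd (-1, 0) 0 (ccnt m 0) = (ccnt m 0, 0) from by
      unfold upd; rw [if_pos (show ccnt m 0 > ((-1:Int), (0:Int)).1 from by simp; omega)]]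
  have hQ0eq : (PySem.List.pyRange 0 (PySem.List.len m) 1).foldl
      (fun s i => upd s i (ccnt m i)) (P.1, 0)
      = if Q.1 > P.1 then Q else (P.1, 0) := by
    rw [upd_fold_start (ccnt m) _ (-1, 0) (P.1, 0) (by simp; omega), hQA]
  rw [hQ0eq]
  by_cases hgt : Q.1 > P.1
  · simp only [if_pos hgt]
    rw [if_neg (show ¬ Q.1 = 0 by omega)]
    split_ifs <;> first | rfl | (exfalso; omega)
  · simp only [if_neg hgt]
    rw [if_neg (show ¬ ((P.1, (0:Int)).1 > P.1) by simp)]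
    by_cases hz : P.1 = 0
    · rw [if_pos hz]
      split_ifs <;> first | rfl | (exfalso; omega)
    · rw [if_neg hz]
      split_ifs <;> first | rfl | (exfalso; omega)

theorem find_max_count_zero_changed : Claim_changed_find_max_count_zero := by
  unfold Claim_changed_find_max_count_zero; decide

theorem find_max_count_zero_tight : Claim_exact_find_max_count_zero := by
  intro m _ _ hD
  subst hD
  decide
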